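-- pv_equiv track=rewrite | github.com/ForeverHaibara/Triple-SOS | triples/utils/text_process.py | _preprocess_text_completion
-- ===== SOURCE A (Python) =====
-- from typing import Union, List, Tuple, Optional, Dict
--
-- def _preprocess_text_completion(
--         poly: str,
--         scientific_notation: bool = False,
--         preserve_patterns: List[str] = ('sqrt',)
--     ) -> str:
--     """
--     Complete the polynomial with * and ^. E.g.
--     1/5a3b2c   ->   1/5*a^3*b^2*c
--
--     Parameters
--     ----------
--     poly: str
--         The polynomial to complete.
--     scientific_notation: bool
--         Whether to parse the scientific notation. If True, 1e2 will be parsed as 100.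
--         If False, 1e2 will be parsed as e^2 where e is a free variable.
--     """
--     SCI = 'e' if scientific_notation else ''
--     preserve_patterns = set(preserve_patterns)
--     if scientific_notation:
--         preserve_patterns.add('e')
--     if '' in preserve_patterns:
--         preserve_patterns.remove('') # will cause infinite loop
--     preserve_patterns = sorted(list(preserve_patterns), key=lambda x: -len(x))
--     def _pattern_match(poly, i):
--         lenp = len(poly)
--         for pattern in preserve_patterns:
--             if lenp >= i + len(pattern) and poly[i:i+len(pattern)] == pattern:
--                 return pattern
--         return None
--     poly = poly.replace(' ','')
--     i = 0
--     while i < len(poly) - 1: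
--         if poly[i].isdigit(): # '0'~'9'
--             if poly[i+1] == '(' or (poly[i+1].isalpha() and poly[i+1] != SCI): # alphabets
--                 # when using scientific notation, e.g. '1e' should not be converted to '1*e'
--                 poly = poly[:i+1] + '*' + poly[i+1:]
--                 i += 1
--         elif poly[i] == ')' or poly[i].isalpha(): # alphabets
--             matched = _pattern_match(poly, i)
--             if matched is not None:
--                 i += len(matched) - 1
--                 if i + 1 < len(poly):
--                     if poly[i+1].isalpha(): # alphabets
--                         poly = poly[:i+1] + '*' + poly[i+1:]
--                         i += 1
--             elif poly[i+1] == '(' or poly[i+1].isalpha():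
--                 poly = poly[:i+1] + '*' + poly[i+1:]
--                 i += 1
--             elif poly[i+1].isdigit(): # '0'~'9'
--                 poly = poly[:i+1] + '^' + poly[i+1:]
--                 i += 1
--         i += 1
--
--     return poly
-- ===== SOURCE B (Python) =====
-- from typing import List
--
-- def _preprocess_text_completion(
--         poly: str,
--         scientific_notation: bool = False,
--         preserve_patterns: List[str] = ('sqrt',)
--     ) -> str:
--     SCI = 'e' if scientific_notation else ''
--     preserve_patterns = set(preserve_patterns)
--     if scientific_notation:
--         preserve_patterns.add('e')
--     if '' in preserve_patterns:
--         preserve_patterns.remove('')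
--     patterns = sorted(preserve_patterns, key=lambda x: -len(x))
--
--     s = poly.replace(' ', '')
--     # Pass 1: tokenize left to right; at an alphabetic char or ')', greedily take
--     # the longest preserved pattern; otherwise a single char tagged by kind.
--     tokens = []  # (kind, text); kind in 'd' digit, 'v' var/')', 'p' preserved, 'o' other
--     i, n = 0, len(s)
--     while i < n:
--         c = s[i]
--         if c.isalpha() or c == ')':
--             m = next((p for p in patterns if s.startswith(p, i)), None)
--             if m is not None:
--                 tokens.append(('p', m))
--                 i += len(m)
--                 continue
--             tokens.append(('v', c))
--         elif c.isdigit():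
--             tokens.append(('d', c))
--         else:
--             tokens.append(('o', c))
--         i += 1
--     # Pass 2: decide the separator between each consecutive pair of tokens.
--     out = []
--     for (k, t), (_, u) in zip(tokens, tokens[1:]):
--         out.append(t)
--         c = u[0]
--         if k == 'd':
--             if c == '(' or (c.isalpha() and c != SCI):
--                 out.append('*')
--         elif k == 'v':
--             if c == '(' or c.isalpha():
--                 out.append('*')
--             elif c.isdigit():
--                 out.append('^')
--         elif k == 'p':
--             if c.isalpha():
--                 out.append('*')
--     if tokens:
--         out.append(tokens[-1][1])
--     return ''.join(out)
-- ===== Notes on version B (the rewrite author's own statement) =====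
-- stated objective: alternative
-- what changed: Replaces A's single in-place loop that mutates the string and re-indexes after every insertion by a two-pass decomposition: a greedy tokenization pass (preserved patterns / single chars tagged by kind) followed by a pass over consecutive token pairs that picks the separator from a kind-keyed rule, joined once at the end.
import Mathlib
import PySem

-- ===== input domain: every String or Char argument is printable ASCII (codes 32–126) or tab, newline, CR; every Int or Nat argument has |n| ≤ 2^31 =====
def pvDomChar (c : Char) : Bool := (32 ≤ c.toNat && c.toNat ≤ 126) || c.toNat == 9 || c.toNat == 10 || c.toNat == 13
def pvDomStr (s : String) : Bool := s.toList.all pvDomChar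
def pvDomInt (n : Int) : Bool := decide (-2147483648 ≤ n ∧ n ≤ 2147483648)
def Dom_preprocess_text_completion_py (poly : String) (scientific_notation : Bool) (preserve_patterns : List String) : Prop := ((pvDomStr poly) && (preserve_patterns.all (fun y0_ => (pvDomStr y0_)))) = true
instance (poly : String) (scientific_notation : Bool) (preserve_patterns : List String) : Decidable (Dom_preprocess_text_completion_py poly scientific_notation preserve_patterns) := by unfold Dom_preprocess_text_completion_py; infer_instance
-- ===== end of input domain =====

-- B rewrites A's single mutate-the-string-and-reindex loop as a two-pass tokenize-then-join
-- (objective: alternative decomposition, same observable return value).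

-- ===== PORT A =====
-- Shared setup (identical lines in both Pythons): SCI/'preserve_patterns' preprocessing and
-- the space removal.  set(...) / add / remove / sorted(key=-len) ported via PySem.
def pvPrepPats (scientific_notation : Bool) (preserve_patterns : List String) : List (List Char) :=
  let s0 : PySem.Set String := PySem.Set.ofList preserve_patterns
  let s1 := if scientific_notation then PySem.Set.add s0 "e" else s0
  let s2 := if "" ∈ s1 then PySem.Set.discard s1 "" else s1
  (PySem.List.sorted s2 (fun x => -(PySem.Str.len x)) false).map String.toList

-- ports poly.replace(' ','') (both Pythons run this line)
def pvStrip (poly : String) : List Char := (PySem.Str.replace poly " " "").toList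

-- every pattern kept by the preprocessing is nonempty ('' is removed); the loops need this
-- to terminate, so it stays above the ports.
theorem pv_empty_not_mem (s : PySem.Set String) :
    "" ∉ (if "" ∈ s then PySem.Set.discard s "" else s) := by
  split
  · simp [PySem.Set.discard, List.mem_filter]
  · next hnm => exact hnm

theorem pvPrepPats_ne (sci : Bool) (pp : List String) :
    ∀ p ∈ pvPrepPats sci pp, p ≠ [] := by
  intro p hp
  unfold pvPrepPats at hp
  simp only [List.mem_map] at hp
  obtain ⟨q, hq, rfl⟩ := hp
  rw [PySem.List.mem_sorted] at hq
  intro hnil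
  have hq0 : q = "" := String.toList_eq_nil_iff.mp hnil
  subst hq0
  exact pv_empty_not_mem _ hq

-- poly[:k] + ch + poly[k:]
def pvInsertAt (s : List Char) (k : Nat) (ch : Char) : List Char := s.take k ++ ch :: s.drop k

theorem length_pvInsertAt (s : List Char) (k : Nat) (ch : Char) :
    (pvInsertAt s k ch).length = s.length + 1 := by
  simp [pvInsertAt]

-- the inner _pattern_match(poly, i) of A
def pvMatchA (pats : List (List Char)) (poly : List Char) (i : Nat) : Option (List Char) :=
  pats.find? (fun p => decide (i + p.length ≤ poly.length) && (((poly.drop i).take p.length) == p))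

-- A's while loop; indices are Nat (i starts at 0 and only grows), poly[j] is poly[j]!.
-- 'i += len(matched) - 1' is i + (p.length - 1) (p ≠ [] by hne, so no Nat truncation).
def pvLoopA (sci : Bool) (pats : List (List Char)) (hne : ∀ p ∈ pats, p ≠ [])
    (poly : List Char) (i : Nat) : List Char :=
  if i + 1 < poly.length then
    if (poly[i]!).isDigit then
      if poly[i+1]! = '(' ∨ ((poly[i+1]!).isAlpha ∧ [poly[i+1]!] ≠ (if sci then ['e'] else [])) then
        pvLoopA sci pats hne (pvInsertAt poly (i+1) '*') (i+2)
      else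
        pvLoopA sci pats hne poly (i+1)
    else if poly[i]! = ')' ∨ (poly[i]!).isAlpha then
      match hm : pvMatchA pats poly i with
      | some p =>
        if (i + (p.length - 1)) + 1 < poly.length ∧ (poly[(i + (p.length - 1)) + 1]!).isAlpha then
          pvLoopA sci pats hne (pvInsertAt poly ((i + (p.length - 1)) + 1) '*') ((i + (p.length - 1)) + 2)
        else
          pvLoopA sci pats hne poly ((i + (p.length - 1)) + 1)
      | none =>
        if poly[i+1]! = '(' ∨ (poly[i+1]!).isAlpha then
          pvLoopA sci pats hne (pvInsertAt poly (i+1) '*') (i+2)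
        else if (poly[i+1]!).isDigit then
          pvLoopA sci pats hne (pvInsertAt poly (i+1) '^') (i+2)
        else
          pvLoopA sci pats hne poly (i+1)
    else
      pvLoopA sci pats hne poly (i+1)
  else poly
termination_by poly.length - i
decreasing_by
  · rw [length_pvInsertAt]; omega
  · omega
  · have hl : 1 ≤ p.length := List.length_pos_of_ne_nil (hne p (List.mem_of_find?_eq_some hm))
    rw [length_pvInsertAt]; omega
  · have hl : 1 ≤ p.length := List.length_pos_of_ne_nil (hne p (List.mem_of_find?_eq_some hm))
    omega
  · rw [length_pvInsertAt]; omega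
  · rw [length_pvInsertAt]; omega
  · omega
  · omega

def preprocess_text_completion_py (poly : String) (scientific_notation : Bool) (preserve_patterns : List String) : String :=
  String.ofList (pvLoopA scientific_notation (pvPrepPats scientific_notation preserve_patterns)
    (pvPrepPats_ne scientific_notation preserve_patterns) (pvStrip poly) 0)

-- ===== PORT B =====
inductive PvKind | dig | var | pre | oth
deriving DecidableEq, Repr

-- pass 1 of Source B: greedy tokenization (preserved patterns at alpha/')' positions)
def pvTokenize (pats : List (List Char)) (hne : ∀ p ∈ pats, p ≠ []) :
    List Char → List (PvKind × List Char)
  | [] => []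
  | c :: rest =>
    if c.isAlpha ∨ c = ')' then
      match hm : pats.find? (fun p => (((c :: rest).take p.length) == p)) with
      | some p => (PvKind.pre, p) :: pvTokenize pats hne ((c :: rest).drop p.length)
      | none => (PvKind.var, [c]) :: pvTokenize pats hne rest
    else if c.isDigit then (PvKind.dig, [c]) :: pvTokenize pats hne rest
    else (PvKind.oth, [c]) :: pvTokenize pats hne rest
termination_by s => s.length
decreasing_by
  · have hl : 1 ≤ p.length := List.length_pos_of_ne_nil (hne p (List.mem_of_find?_eq_some hm))
    simp; omega
  all_goals simp

-- pass 2 of Source B: the separator between a token of kind k and a next token starting with c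
def pvSep (sci : Bool) (k : PvKind) (c : Char) : List Char :=
  match k with
  | PvKind.dig => if c = '(' ∨ (c.isAlpha ∧ [c] ≠ (if sci then ['e'] else [])) then ['*'] else []
  | PvKind.var => if c = '(' ∨ c.isAlpha then ['*'] else if c.isDigit then ['^'] else []
  | PvKind.pre => if c.isAlpha then ['*'] else []
  | PvKind.oth => []

def pvRender (sci : Bool) : List (PvKind × List Char) → List Char
  | [] => []
  | [(_, t)] => t
  | (k, t) :: (u, v) :: ts => t ++ pvSep sci k (v.headD ' ') ++ pvRender sci ((u, v) :: ts)

def preprocess_text_completion_py_alt (poly : String) (scientific_notation : Bool) (preserve_patterns : List String) : String :=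
  String.ofList (pvRender scientific_notation
    (pvTokenize (pvPrepPats scientific_notation preserve_patterns)
      (pvPrepPats_ne scientific_notation preserve_patterns) (pvStrip poly)))

-- ===== PRECONDITION & SPEC =====
def Spec_preprocess_text_completion_py (poly : String) (scientific_notation : Bool) (preserve_patterns : List String) (out : String) : Prop := out = preprocess_text_completion_py_alt poly scientific_notation preserve_patterns
instance (poly : String) (scientific_notation : Bool) (preserve_patterns : List String) (out : String) : Decidable (Spec_preprocess_text_completion_py poly scientific_notation preserve_patterns out) := by unfold Spec_preprocess_text_completion_py; infer_instance

-- ===== CLAIM (what is proved, stated in full; the proofs are below) =====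
def Claim_equal_preprocess_text_completion_py : Prop := ∀ (poly : String) (scientific_notation : Bool) (preserve_patterns : List String), Dom_preprocess_text_completion_py poly scientific_notation preserve_patterns → Spec_preprocess_text_completion_py poly scientific_notation preserve_patterns (preprocess_text_completion_py poly scientific_notation preserve_patterns)

-- ===== LEMMAS AND PROOFS =====

theorem pv_getElem_bang_append (done l : List Char) (c : Char) :
    (done ++ c :: l)[done.length]! = c := by
  have h : done.length < (done ++ c :: l).length := by simp
  rw [List.getElem!_eq_getElem?_getD, List.getElem?_eq_getElem h]
  simp

theorem pv_find?_congr {f g : List Char → Bool} (xs : List (List Char))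
    (h : ∀ a ∈ xs, f a = g a) : xs.find? f = xs.find? g := by
  induction xs with
  | nil => rfl
  | cons a t ih =>
    simp only [List.find?_cons]
    rw [h a (by simp)]
    cases g a <;> simp [ih (fun b hb => h b (by simp [hb]))]

theorem pv_matchA_suffix (pats : List (List Char)) (done rest : List Char) :
    pvMatchA pats (done ++ rest) done.length
      = pats.find? (fun p => ((rest.take p.length) == p)) := by
  apply pv_find?_congr
  intro p _
  simp only [List.drop_left, List.length_append]
  by_cases h : p.length ≤ rest.length
  · simp
    intro _
    exact h
  · have ht : rest.take p.length = rest := List.take_of_length_le (by omega)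
    rw [ht]
    have hb : (rest == p) = false := by
      refine beq_false_of_ne ?_; intro e; subst e; omega
    simp [hb]

theorem pv_insertAt_append (done l : List Char) (ch : Char) :
    pvInsertAt (done ++ l) done.length ch = done ++ ch :: l := by
  simp [pvInsertAt]

theorem pv_insertAt_mid (done l : List Char) (c ch : Char) :
    pvInsertAt (done ++ c :: l) (done.length + 1) ch = done ++ c :: ch :: l := by
  have := pv_insertAt_append (done ++ [c]) l ch
  simpa using this

-- what a successful greedy pattern match at the front of rest gives
theorem pv_prefix_of_find (pats : List (List Char)) (hne : ∀ p ∈ pats, p ≠ [])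
    (rest p : List Char)
    (h : pats.find? (fun p => ((rest.take p.length) == p)) = some p) :
    1 ≤ p.length ∧ p.length ≤ rest.length ∧ rest = p ++ rest.drop p.length := by
  have hmem := List.mem_of_find?_eq_some h
  have hpred := List.find?_some h
  have hp : rest.take p.length = p := by simpa using hpred
  have h1 : 1 ≤ p.length := List.length_pos_of_ne_nil (hne p hmem)
  have h2 : p.length ≤ rest.length := by
    by_contra hgt
    have ht : rest.take p.length = rest := List.take_of_length_le (by omega)
    rw [ht] at hp
    have := congrArg List.length hp
    simp at this; omega
  refine ⟨h1, h2, ?_⟩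
  conv_lhs => rw [← List.take_append_drop p.length rest]
  rw [hp]

-- the first token of a nonempty string starts with its first char
theorem pv_tokenize_head (pats : List (List Char)) (hne : ∀ p ∈ pats, p ≠ [])
    (c : Char) (rest : List Char) :
    ∃ k t ts, pvTokenize pats hne (c :: rest) = (k, t) :: ts ∧ t.headD ' ' = c := by
  rw [pvTokenize]
  split
  · rcases hfm : pats.find? (fun p => (((c :: rest).take p.length) == p)) with _ | p
    · exact ⟨PvKind.var, [c], _, rfl, rfl⟩
    · refine ⟨PvKind.pre, p, _, rfl, ?_⟩
      obtain ⟨h1, _, heq⟩ := pv_prefix_of_find pats hne (c :: rest) p hfm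
      cases p with
      | nil => simp at h1
      | cons a q => simp at heq; simp [heq.1]
  · split
    · exact ⟨PvKind.dig, [c], _, rfl, rfl⟩
    · exact ⟨PvKind.oth, [c], _, rfl, rfl⟩

theorem pv_render_cons (sci : Bool) (pats : List (List Char)) (hne : ∀ p ∈ pats, p ≠ [])
    (k : PvKind) (t : List Char) (c : Char) (rest : List Char) :
    pvRender sci ((k, t) :: pvTokenize pats hne (c :: rest))
      = t ++ pvSep sci k c ++ pvRender sci (pvTokenize pats hne (c :: rest)) := by
  obtain ⟨k', t', ts, heq, hhd⟩ := pv_tokenize_head pats hne c rest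
  rw [heq, pvRender, hhd]

theorem pv_render_tok_single (sci : Bool) (pats : List (List Char))
    (hne : ∀ p ∈ pats, p ≠ []) (c : Char) :
    pvRender sci (pvTokenize pats hne [c]) = [c] := by
  rw [pvTokenize]
  split
  · rcases hfm : pats.find? (fun p => ((([c] : List Char).take p.length) == p)) with _ | p
    · simp [pvTokenize, pvRender]
    · obtain ⟨h1, h2, heq⟩ := pv_prefix_of_find pats hne [c] p hfm
      have hp1 : p.length = 1 := by simp at h2; omega
      have hpc : p = [c] := by
        cases p with
        | nil => simp at h1
        | cons a q =>
          have hq : q = [] := by simpa using hp1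
          subst hq
          simp at heq
          simp [heq]
      subst hpc
      simp [pvTokenize, pvRender]
  · split <;> simp [pvTokenize, pvRender]

-- digits are neither alphabetic nor ')'
theorem pv_digit_not_alpha (c : Char) (h : c.isDigit = true) : ¬(c.isAlpha = true ∨ c = ')') := by
  rintro (ha | rfl)
  · simp [Char.isDigit, Char.isAlpha, Char.isUpper, Char.isLower, UInt32.le_iff_toNat_le] at h ha
    omega
  · simp [Char.isDigit] at h

theorem pv_main (sci : Bool) (pats : List (List Char)) (hne : ∀ p ∈ pats, p ≠ []) :
    ∀ (n : Nat) (rest done : List Char), rest.length ≤ n →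
      pvLoopA sci pats hne (done ++ rest) done.length
        = done ++ pvRender sci (pvTokenize pats hne rest) := by
  intro n
  induction n with
  | zero =>
    intro rest done h
    have : rest = [] := List.eq_nil_of_length_eq_zero (by omega)
    subst this
    rw [pvLoopA, if_neg (by simp)]
    simp [pvTokenize, pvRender]
  | succ n IH =>
    intro rest done hlen
    match rest with
    | [] =>
      rw [pvLoopA, if_neg (by simp)]; simp [pvTokenize, pvRender]
    | [c] =>
      rw [pvLoopA, if_neg (by simp), pv_render_tok_single]
    | c :: d :: rs =>
      have h1 : (done ++ c :: d :: rs)[done.length]! = c := pv_getElem_bang_append done (d :: rs) c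
      have h2 : (done ++ c :: d :: rs)[done.length + 1]! = d := by
        have := pv_getElem_bang_append (done ++ [c]) rs d
        simpa using this
      have hlen' : rs.length + 1 ≤ n := by simpa using hlen
      rw [pvLoopA, if_pos (by simp), h1, h2]
      by_cases hcD : c.isDigit
      · -- digit branch of A
        rw [if_pos hcD]
        have htok : pvTokenize pats hne (c :: d :: rs)
            = (PvKind.dig, [c]) :: pvTokenize pats hne (d :: rs) := by
          rw [pvTokenize, if_neg (pv_digit_not_alpha c hcD), if_pos hcD]
        rw [htok, pv_render_cons]
        by_cases hsep : d = '(' ∨ (d.isAlpha ∧ [d] ≠ (if sci then ['e'] else []))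
        · rw [if_pos hsep, pv_insertAt_mid]
          have hr2 : done ++ c :: '*' :: d :: rs = (done ++ [c, '*']) ++ d :: rs := by simp
          have hl2 : done.length + 2 = (done ++ [c, '*']).length := by simp
          rw [hr2, hl2, IH (d :: rs) (done ++ [c, '*']) (by simpa using hlen')]
          simp [pvSep, hsep]
        · rw [if_neg hsep]
          have hr2 : done ++ c :: d :: rs = (done ++ [c]) ++ d :: rs := by simp
          have hl2 : done.length + 1 = (done ++ [c]).length := by simp
          rw [hr2, hl2, IH (d :: rs) (done ++ [c]) (by simpa using hlen')]
          simp [pvSep, hsep]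
      · rw [if_neg hcD]
        by_cases hcA : c = ')' ∨ c.isAlpha
        · -- alphabet / ')' branch of A: pattern match
          rw [if_pos hcA]
          have hcA' : c.isAlpha ∨ c = ')' := hcA.symm
          have hmr : pvMatchA pats (done ++ c :: d :: rs) done.length
              = pats.find? (fun p => (((c :: d :: rs).take p.length) == p)) :=
            pv_matchA_suffix pats done (c :: d :: rs)
          split
          next p heq =>
            have hfm : pats.find? (fun p => (((c :: d :: rs).take p.length) == p)) = some p :=
              hmr.symm.trans heq
            obtain ⟨hL1, hL2, hsplit⟩ := pv_prefix_of_find pats hne (c :: d :: rs) p hfm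
            have htok : pvTokenize pats hne (c :: d :: rs)
                = (PvKind.pre, p) :: pvTokenize pats hne ((c :: d :: rs).drop p.length) := by
              rw [pvTokenize, if_pos hcA', hfm]
            have hidx : done.length + (p.length - 1) + 1 = done.length + p.length := by omega
            rw [htok]
            rcases htail : (c :: d :: rs).drop p.length with _ | ⟨e, tl⟩
            · -- the pattern reaches the very end of the string: nothing to insert
              have hLfull : p.length = rs.length + 2 := by
                have h5 := congrArg List.length htail
                have hL2' : p.length ≤ rs.length + 2 := by simpa using hL2
                simp at h5; omega
              rw [if_neg (by rw [hidx]; rintro ⟨hlt, -⟩; simp at hlt; omega)]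
              have hpoly : done ++ c :: d :: rs = done ++ p := by
                conv_lhs => rw [hsplit]
                simp [htail]
              have hl3 : done.length + (p.length - 1) + 1 = (done ++ p).length := by
                simp; omega
              have hIH := IH [] (done ++ p) (by simp)
              simp only [List.append_nil] at hIH
              rw [hpoly, hl3, hIH]
              simp [pvTokenize, pvRender]
            · -- the string continues after the pattern with e
              have hpoly : done ++ c :: d :: rs = (done ++ p) ++ e :: tl := by
                conv_lhs => rw [hsplit]
                simp [htail]
              have htl : tl.length + 1 ≤ n := by
                have h5 := congrArg List.length htail
                simp at h5 hlen; omega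
              have he : (done ++ c :: d :: rs)[done.length + (p.length - 1) + 1]! = e := by
                rw [hidx, hpoly]
                have h6 := pv_getElem_bang_append (done ++ p) tl e
                simpa using h6
              rw [he]
              by_cases heA : e.isAlpha
              · rw [if_pos ⟨by rw [hidx, hpoly]; simp, heA⟩]
                have hins : pvInsertAt (done ++ c :: d :: rs) (done.length + (p.length - 1) + 1) '*'
                    = ((done ++ p) ++ ['*']) ++ e :: tl := by
                  rw [hidx, hpoly]
                  have h7 : done.length + p.length = (done ++ p).length := by simp
                  rw [h7, pv_insertAt_append]
                  simp
                have hl3 : done.length + (p.length - 1) + 2 = (((done ++ p) ++ ['*'])).length := by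
                  simp; omega
                rw [hins, hl3, IH (e :: tl) ((done ++ p) ++ ['*']) (by simpa using htl),
                  pv_render_cons]
                simp [pvSep, heA]
              · rw [if_neg (by rintro ⟨-, hx⟩; exact heA hx)]
                have hl3 : done.length + (p.length - 1) + 1 = (done ++ p).length := by
                  simp; omega
                rw [hpoly, hl3, IH (e :: tl) (done ++ p) (by simpa using htl),
                  pv_render_cons]
                simp [pvSep, heA]
          next heq =>
            have hfm : pats.find? (fun p => (((c :: d :: rs).take p.length) == p)) = none :=
              hmr.symm.trans heq
            have htok : pvTokenize pats hne (c :: d :: rs)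
                = (PvKind.var, [c]) :: pvTokenize pats hne (d :: rs) := by
              rw [pvTokenize, if_pos hcA', hfm]
            rw [htok, pv_render_cons]
            by_cases hs1 : d = '(' ∨ d.isAlpha
            · rw [if_pos hs1, pv_insertAt_mid]
              have hr2 : done ++ c :: '*' :: d :: rs = (done ++ [c, '*']) ++ d :: rs := by simp
              have hl2 : done.length + 2 = (done ++ [c, '*']).length := by simp
              rw [hr2, hl2, IH (d :: rs) (done ++ [c, '*']) (by simpa using hlen')]
              simp [pvSep, hs1]
            · rw [if_neg hs1]
              by_cases hs2 : d.isDigit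
              · rw [if_pos hs2, pv_insertAt_mid]
                have hr2 : done ++ c :: '^' :: d :: rs = (done ++ [c, '^']) ++ d :: rs := by simp
                have hl2 : done.length + 2 = (done ++ [c, '^']).length := by simp
                rw [hr2, hl2, IH (d :: rs) (done ++ [c, '^']) (by simpa using hlen')]
                simp [pvSep, hs1, hs2]
              · rw [if_neg hs2]
                have hr2 : done ++ c :: d :: rs = (done ++ [c]) ++ d :: rs := by simp
                have hl2 : done.length + 1 = (done ++ [c]).length := by simp
                rw [hr2, hl2, IH (d :: rs) (done ++ [c]) (by simpa using hlen')]
                simp [pvSep, hs1, hs2]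
        · -- any other character: A inserts nothing
          rw [if_neg hcA]
          have htok : pvTokenize pats hne (c :: d :: rs)
              = (PvKind.oth, [c]) :: pvTokenize pats hne (d :: rs) := by
            rw [pvTokenize, if_neg (by tauto), if_neg hcD]
          rw [htok, pv_render_cons]
          have hr2 : done ++ c :: d :: rs = (done ++ [c]) ++ d :: rs := by simp
          have hl2 : done.length + 1 = (done ++ [c]).length := by simp
          rw [hr2, hl2, IH (d :: rs) (done ++ [c]) (by simpa using hlen')]
          simp [pvSep]

-- ===== VERDICT (by name: the statement is the Claim_ definition above) =====
theorem preprocess_text_completion_py_spec : Claim_equal_preprocess_text_completion_py := by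
  intro poly sci pp _
  unfold Spec_preprocess_text_completion_py preprocess_text_completion_py preprocess_text_completion_py_alt
  have h := pv_main sci (pvPrepPats sci pp) (pvPrepPats_ne sci pp) (pvStrip poly).length
    (pvStrip poly) [] (le_refl _)
  simpa using congrArg String.ofList h
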